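-- pv_equiv track=rewrite | github.com/Shimwell/paramak-2 | src/paramak/utils.py | sum_after_gap_following_plasma
-- ===== SOURCE A (Python) =====
-- def sum_after_gap_following_plasma(radial_build):
--     found_plasma = False
--     found_gap_after_plasma = False
--     total_sum = 0
--
--     for item in radial_build:
--         if found_gap_after_plasma:
--             total_sum += item[1]
--         elif found_plasma and item[0] == "gap":
--             found_gap_after_plasma = True
--         elif item[0] == "plasma":
--             found_plasma = True
--
--     if not found_plasma:
--         raise ValueError("'plasma' entry not found")
--     if not found_gap_after_plasma:
--         raise ValueError("'plasma' entry is not followed by a 'gap'")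
--
--     return total_sum
-- ===== SOURCE B (Python) =====
-- def sum_after_gap_following_plasma(radial_build):
--     names = [item[0] for item in radial_build]
--     try:
--         i = names.index("plasma")
--     except ValueError:
--         raise ValueError("'plasma' entry not found")
--     try:
--         j = names.index("gap", i + 1)
--     except ValueError:
--         raise ValueError("'plasma' entry is not followed by a 'gap'")
--     return sum(item[1] for item in radial_build[j + 1:])
-- ===== Notes on version B (the rewrite author's own statement) =====
-- stated objective: simpler
-- what changed: Replaces the two-flag single-pass state machine with explicit index searches (first 'plasma', then first 'gap' after it) followed by a slice-sum of the tail.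
import Mathlib
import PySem

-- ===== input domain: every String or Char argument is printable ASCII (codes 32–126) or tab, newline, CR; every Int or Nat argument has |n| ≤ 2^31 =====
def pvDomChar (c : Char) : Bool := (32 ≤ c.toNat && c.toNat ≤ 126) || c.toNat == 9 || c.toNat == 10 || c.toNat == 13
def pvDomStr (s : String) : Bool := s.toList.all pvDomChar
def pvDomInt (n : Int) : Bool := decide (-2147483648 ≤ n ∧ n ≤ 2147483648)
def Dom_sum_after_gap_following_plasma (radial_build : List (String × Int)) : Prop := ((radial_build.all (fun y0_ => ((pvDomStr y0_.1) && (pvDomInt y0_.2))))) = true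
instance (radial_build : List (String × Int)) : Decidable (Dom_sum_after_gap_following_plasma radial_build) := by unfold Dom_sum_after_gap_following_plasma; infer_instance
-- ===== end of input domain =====

-- B replaces A's two-flag single-pass state machine by two index searches and a tail slice-sum (objective: simpler).

-- ===== PORT A =====
-- state = (found_plasma, found_gap_after_plasma, total_sum)
def pvStepA (s : Bool × Bool × Int) (item : String × Int) : Bool × Bool × Int :=
  if s.2.1 then (s.1, s.2.1, s.2.2 + item.2)
  else if s.1 && (item.1 == "gap") then (s.1, true, s.2.2)
  else if item.1 == "plasma" then (true, s.2.1, s.2.2)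
  else s

def sum_after_gap_following_plasma (radial_build : List (String × Int)) : Int :=
  (radial_build.foldl pvStepA (false, false, 0)).2.2

-- ===== PORT B =====
def sum_after_gap_following_plasma_alt (radial_build : List (String × Int)) : Int :=
  let names := radial_build.map Prod.fst
  match names.findIdx? (· == "plasma") with
  | none => 0      -- Python B raises ValueError here (outside Pre_)
  | some i =>
    match (names.drop (i + 1)).findIdx? (· == "gap") with
    | none => 0    -- Python B raises ValueError here (outside Pre_)
    | some k => ((radial_build.drop (i + 1 + k + 1)).map Prod.snd).sum

-- ===== PRECONDITION & SPEC =====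
-- Pre_ holds exactly where Python A returns: some 'plasma' entry is followed (strictly later) by a 'gap' entry; otherwise A raises ValueError.
def Pre_sum_after_gap_following_plasma (radial_build : List (String × Int)) : Prop :=
  ∃ i < radial_build.length, ∃ j < radial_build.length, i < j ∧
    (radial_build.getD i ("", 0)).1 = "plasma" ∧ (radial_build.getD j ("", 0)).1 = "gap"
instance (radial_build : List (String × Int)) : Decidable (Pre_sum_after_gap_following_plasma radial_build) := by unfold Pre_sum_after_gap_following_plasma; infer_instance

def pvWitness_sum_after_gap_following_plasma : (List (String × Int)) :=
  [("plasma", 10), ("gap", 2), ("wall", 3), ("shield", 4)]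

def Spec_sum_after_gap_following_plasma (radial_build : List (String × Int)) (out : Int) : Prop := out = sum_after_gap_following_plasma_alt radial_build
instance (radial_build : List (String × Int)) (out : Int) : Decidable (Spec_sum_after_gap_following_plasma radial_build out) := by unfold Spec_sum_after_gap_following_plasma; infer_instance

-- ===== CLAIM (what is proved, stated in full; the proofs are below) =====
def Claim_equal_sum_after_gap_following_plasma : Prop := ∀ (radial_build : List (String × Int)), Dom_sum_after_gap_following_plasma radial_build → Pre_sum_after_gap_following_plasma radial_build → Spec_sum_after_gap_following_plasma radial_build (sum_after_gap_following_plasma radial_build)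

-- ===== LEMMAS AND PROOFS =====

-- proof helpers: the tail of the list that actually gets summed
def pvGapTail (l : List (String × Int)) : List (String × Int) :=
  match (l.map Prod.fst).findIdx? (· == "gap") with
  | some k => l.drop (k + 1)
  | none => []

def pvFullTail (l : List (String × Int)) : List (String × Int) :=
  match (l.map Prod.fst).findIdx? (· == "plasma") with
  | some i => pvGapTail (l.drop (i + 1))
  | none => []

theorem pvStepA_gapState (a : Bool) (t : Int) (x : String × Int) :
    pvStepA (a, true, t) x = (a, true, t + x.2) := by simp [pvStepA]

theorem pvStepA_plasmaState (t : Int) (x : String × Int) :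
    pvStepA (true, false, t) x = if x.1 = "gap" then (true, true, t) else (true, false, t) := by
  by_cases h : x.1 = "gap" <;> simp [pvStepA, h]

theorem pvStepA_startState (t : Int) (x : String × Int) :
    pvStepA (false, false, t) x = if x.1 = "plasma" then (true, false, t) else (false, false, t) := by
  by_cases h : x.1 = "plasma" <;> simp [pvStepA, h]

-- once the gap flag is set, every remaining item's value is added
theorem pvFold_gapTrue (l : List (String × Int)) : ∀ (a : Bool) (t : Int),
    l.foldl pvStepA (a, true, t) = (a, true, t + (l.map Prod.snd).sum) := by
  induction l with
  | nil => intro a t; simp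
  | cons x xs ih =>
    intro a t
    rw [List.foldl_cons, pvStepA_gapState, ih]
    simp; ring

-- after the plasma flag is set, the fold waits for the first "gap" then sums the rest
theorem pvFold_plasmaTrue (l : List (String × Int)) : ∀ (t : Int),
    (l.foldl pvStepA (true, false, t)).2.2 = t + ((pvGapTail l).map Prod.snd).sum := by
  induction l with
  | nil => intro t; simp [pvGapTail]
  | cons x xs ih =>
    intro t
    rw [List.foldl_cons, pvStepA_plasmaState]
    by_cases h : x.1 = "gap"
    · rw [if_pos h, pvFold_gapTrue]
      have hb : (x.1 == "gap") = true := by simpa using h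
      simp [pvGapTail, List.findIdx?_cons, hb]
    · rw [if_neg h, ih]
      have hb : (x.1 == "gap") = false := by simpa using h
      simp only [pvGapTail, List.map_cons, List.findIdx?_cons, hb]
      cases hf : (xs.map Prod.fst).findIdx? (· == "gap") <;> simp

-- from the initial state the fold waits for the first "plasma", then for the gap, then sums
theorem pvFold_start (l : List (String × Int)) : ∀ (t : Int),
    (l.foldl pvStepA (false, false, t)).2.2 = t + ((pvFullTail l).map Prod.snd).sum := by
  induction l with
  | nil => intro t; simp [pvFullTail]
  | cons x xs ih =>
    intro t
    rw [List.foldl_cons, pvStepA_startState]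
    by_cases h : x.1 = "plasma"
    · rw [if_pos h, pvFold_plasmaTrue]
      have hb : (x.1 == "plasma") = true := by simpa using h
      simp [pvFullTail, List.findIdx?_cons, hb]
    · rw [if_neg h, ih]
      have hb : (x.1 == "plasma") = false := by simpa using h
      simp only [pvFullTail, List.map_cons, List.findIdx?_cons, hb]
      cases hf : (xs.map Prod.fst).findIdx? (· == "plasma") <;> simp [pvGapTail]

-- B's nested matches compute exactly the sum over pvFullTail
theorem pvAlt_eq (l : List (String × Int)) :
    sum_after_gap_following_plasma_alt l = ((pvFullTail l).map Prod.snd).sum := by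
  unfold sum_after_gap_following_plasma_alt pvFullTail pvGapTail
  simp only [← List.map_drop, List.findIdx?_map]
  cases hp : l.findIdx? ((fun x => x == "plasma") ∘ Prod.fst) with
  | none => simp
  | some i =>
    simp only []
    cases hg : (l.drop (i + 1)).findIdx? ((fun x => x == "gap") ∘ Prod.fst) with
    | none => simp
    | some k => simp [List.drop_drop]; ring_nf

-- ===== VERDICT (by name: the statement is the Claim_ definition above) =====
theorem sum_after_gap_following_plasma_spec : Claim_equal_sum_after_gap_following_plasma := by
  intro rb _ _
  unfold Spec_sum_after_gap_following_plasma sum_after_gap_following_plasma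
  rw [pvAlt_eq, pvFold_start]
  ring
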